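-- pv_equiv track=rewrite | github.com/lingkai5wu/LeetCode | contest/w469/q1.py | decimalRepresentation
-- ===== SOURCE A (Python) =====
-- from typing import List
--
-- def decimalRepresentation(n: int) -> List[int]:
--     res = []
--     count = 0
--     while n > 0:
--         mod = n % 10
--         if mod != 0:
--             res.append(mod * 10 ** count)
--         n = n // 10
--         count += 1
--     res.reverse()
--     return res
-- ===== SOURCE B (Python) =====
-- def decimalRepresentation(n: int):
--     def go(m, p):
--         if m <= 0:
--             return []
--         rest = go(m // 10, p * 10)
--         d = m % 10
--         if d != 0:
--             rest.append(d * p)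
--         return rest
--     return go(n, 1)
-- ===== Notes on version B (the rewrite author's own statement) =====
-- stated objective: alternative
-- what changed: a recursive helper tracking the current place value builds the result most-significant-first directly, replacing A's least-significant-first append loop with a digit counter, an explicit power computation, and a final reverse
import Mathlib
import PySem

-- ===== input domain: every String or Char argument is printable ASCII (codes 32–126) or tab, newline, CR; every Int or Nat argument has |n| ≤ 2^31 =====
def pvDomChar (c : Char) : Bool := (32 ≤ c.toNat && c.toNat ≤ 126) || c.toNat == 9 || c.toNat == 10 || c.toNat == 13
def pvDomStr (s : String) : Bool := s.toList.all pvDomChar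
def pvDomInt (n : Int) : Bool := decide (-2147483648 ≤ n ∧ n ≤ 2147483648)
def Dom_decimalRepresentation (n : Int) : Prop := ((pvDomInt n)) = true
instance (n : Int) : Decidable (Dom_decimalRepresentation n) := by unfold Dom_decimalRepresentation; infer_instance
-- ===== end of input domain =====

-- B replaces A's LSB-first append loop + final reverse by a recursive helper
-- that tracks the current power and builds the result most-significant-first.


-- ===== PORT A =====
-- A's while loop: res accumulator, digit counter (always ≥ 0 in Python, so Nat is exact), 10 ** count.
def decimalRepresentationLoop (n : Int) (count : Nat) (res : List Int) : List Int :=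
  if h : n > 0 then
    let mod := PySem.Int.mod n 10
    let res' := if mod ≠ 0 then res ++ [mod * 10 ^ count] else res
    decimalRepresentationLoop (PySem.Int.floordiv n 10) (count + 1) res'
  else res
termination_by n.toNat
decreasing_by
  simp only [PySem.Int.floordiv]
  rw [Int.fdiv_eq_ediv, if_pos (Or.inl (by norm_num : (0:Int) ≤ 10))]
  omega

def decimalRepresentation (n : Int) : List Int :=
  (decimalRepresentationLoop n 0 []).reverse

-- ===== PORT B =====
def decimalRepresentationGo (m p : Int) : List Int :=
  if _h : m ≤ 0 then []
  else
    let rest := decimalRepresentationGo (PySem.Int.floordiv m 10) (p * 10)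
    let d := PySem.Int.mod m 10
    if d ≠ 0 then rest ++ [d * p] else rest
termination_by m.toNat
decreasing_by
  simp only [PySem.Int.floordiv]
  rw [Int.fdiv_eq_ediv, if_pos (Or.inl (by norm_num : (0:Int) ≤ 10))]
  omega

def decimalRepresentation_alt (n : Int) : List Int :=
  decimalRepresentationGo n 1

-- ===== PRECONDITION & SPEC =====
def Spec_decimalRepresentation (n : Int) (out : List Int) : Prop := out = decimalRepresentation_alt n
instance (n : Int) (out : List Int) : Decidable (Spec_decimalRepresentation n out) := by unfold Spec_decimalRepresentation; infer_instance

-- ===== CLAIM (what is proved, stated in full; the proofs are below) =====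
def Claim_equal_decimalRepresentation : Prop := ∀ (n : Int), Dom_decimalRepresentation n → Spec_decimalRepresentation n (decimalRepresentation n)

-- ===== LEMMAS AND PROOFS =====
theorem loop_reverse_eq_go (n : Int) (count : Nat) (res : List Int) :
    (decimalRepresentationLoop n count res).reverse
      = decimalRepresentationGo n (10 ^ count) ++ res.reverse := by
  induction n, count, res using decimalRepresentationLoop.induct with
  | case1 n count res h mod res' ih =>
      rw [decimalRepresentationLoop, decimalRepresentationGo]
      simp only [dif_pos h, dif_neg (by omega : ¬ n ≤ 0)]
      rw [pow_succ] at ih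
      rw [show (if PySem.Int.mod n 10 ≠ 0 then res ++ [PySem.Int.mod n 10 * 10 ^ count] else res) = res' from rfl, ih]
      by_cases hd : (10:Int) ∣ n <;> simp [res', mod, hd]
  | case2 n count res h =>
      rw [decimalRepresentationLoop, decimalRepresentationGo]
      simp only [dif_neg h, dif_pos (by omega : n ≤ 0)]
      simp

-- ===== VERDICT (by name: the statement is the Claim_ definition above) =====
theorem decimalRepresentation_spec : Claim_equal_decimalRepresentation := by
  intro n _
  unfold Spec_decimalRepresentation decimalRepresentation decimalRepresentation_alt
  have := loop_reverse_eq_go n 0 []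
  simpa using this
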